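-- pv_equiv track=rewrite | github.com/mehow94/Embroidery | embroidery.py | draw_christmas_tree
-- ===== SOURCE A (Python) =====
-- def draw_christmas_tree(blocks, border_color = 1, fill_color = 1, empty_color = 0, block_height = 3):
--     matrix = []
--     block_width = 3 + 2 * blocks
--
--     for block_number in range(blocks):
--         for i in range(block_height):
--             row = []
--             for j in range(block_width):
--                 if j < i + block_number  or j >= block_width - i - block_number:
--                     row.append(empty_color)
--                 else:
--                     if (j < i + block_number + 1 or
--                         j >= block_width - i - block_number -1 or
--                         (block_number == 0 and i == 0)):
--                         row.append(border_color)
--                     else: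
--                         row.append(fill_color)
--
--             matrix.append(row)
--     matrix.reverse()
--     return matrix
-- ===== SOURCE B (Python) =====
-- def draw_christmas_tree(blocks, border_color = 1, fill_color = 1, empty_color = 0, block_height = 3):
--     width = 3 + 2 * blocks
--     matrix = []
--     # build the rows directly in final (reversed) order, composing each row
--     # from whole segments instead of testing every cell index
--     for block_number in reversed(range(blocks)):
--         for i in reversed(range(block_height)):
--             k = block_number + i
--             w = width - 2 * k
--             if w <= 0:
--                 row = [empty_color] * width
--             elif block_number == 0 and i == 0:
--                 row = [border_color] * width
--             elif w <= 2:
--                 row = [empty_color] * k + [border_color] * w + [empty_color] * k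
--             else:
--                 row = ([empty_color] * k + [border_color] +
--                        [fill_color] * (w - 2) + [border_color] + [empty_color] * k)
--             matrix.append(row)
--     return matrix
-- ===== Notes on version B (the rewrite author's own statement) =====
-- stated objective: simpler
-- what changed: B composes each row from whole segments ([empty]*k + border/fill middle + [empty]*k) computed by arithmetic instead of testing every cell index with nested conditionals, and emits the rows directly in the final reversed order instead of appending and reversing at the end.
import Mathlib
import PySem

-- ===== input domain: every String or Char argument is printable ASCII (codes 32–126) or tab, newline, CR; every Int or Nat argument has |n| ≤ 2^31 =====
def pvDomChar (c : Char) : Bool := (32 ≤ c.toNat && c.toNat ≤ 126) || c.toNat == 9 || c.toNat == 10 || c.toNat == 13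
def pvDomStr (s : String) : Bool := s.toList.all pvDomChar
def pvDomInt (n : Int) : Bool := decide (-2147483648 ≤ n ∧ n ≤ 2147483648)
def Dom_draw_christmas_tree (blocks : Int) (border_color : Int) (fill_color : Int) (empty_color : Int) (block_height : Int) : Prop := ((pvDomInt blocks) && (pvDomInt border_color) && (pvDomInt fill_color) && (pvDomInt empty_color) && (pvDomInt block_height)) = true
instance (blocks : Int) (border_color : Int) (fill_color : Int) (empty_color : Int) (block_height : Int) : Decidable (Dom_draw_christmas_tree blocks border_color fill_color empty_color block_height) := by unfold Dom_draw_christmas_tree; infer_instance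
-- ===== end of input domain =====

-- B builds each row from whole replicate-segments by arithmetic and emits rows directly
-- in the final reversed order, instead of A's per-cell conditional loop plus a final reverse.

-- ===== PORT A =====
def draw_christmas_tree (blocks : Int) (border_color : Int) (fill_color : Int) (empty_color : Int) (block_height : Int) : List (List Int) :=
  let block_width : Int := 3 + 2 * blocks
  let matrix : List (List Int) :=
    (PySem.List.pyRange 0 blocks 1).foldl (fun matrix block_number =>
      (PySem.List.pyRange 0 block_height 1).foldl (fun matrix i =>
        let row : List Int :=
          (PySem.List.pyRange 0 block_width 1).foldl (fun row j =>
            if j < i + block_number ∨ block_width - i - block_number ≤ j then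
              row ++ [empty_color]
            else if j < i + block_number + 1 ∨ block_width - i - block_number - 1 ≤ j ∨ (block_number = 0 ∧ i = 0) then
              row ++ [border_color]
            else
              row ++ [fill_color]) []
        matrix ++ [row]) matrix) []
  matrix.reverse

-- ===== PORT B =====
def draw_christmas_tree_alt (blocks : Int) (border_color : Int) (fill_color : Int) (empty_color : Int) (block_height : Int) : List (List Int) :=
  let width : Int := 3 + 2 * blocks
  ((PySem.List.pyRange 0 blocks 1).reverse).foldl (fun matrix block_number =>
    ((PySem.List.pyRange 0 block_height 1).reverse).foldl (fun matrix i =>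
      let k : Int := block_number + i
      let w : Int := width - 2 * k
      let row : List Int :=
        if w ≤ 0 then List.replicate width.toNat empty_color
        else if block_number = 0 ∧ i = 0 then List.replicate width.toNat border_color
        else if w ≤ 2 then
          List.replicate k.toNat empty_color ++ List.replicate w.toNat border_color ++ List.replicate k.toNat empty_color
        else
          List.replicate k.toNat empty_color ++ [border_color] ++ List.replicate (w - 2).toNat fill_color ++ [border_color] ++ List.replicate k.toNat empty_color
      matrix ++ [row]) matrix) []

-- ===== PRECONDITION & SPEC =====
def Spec_draw_christmas_tree (blocks : Int) (border_color : Int) (fill_color : Int) (empty_color : Int) (block_height : Int) (out : List (List Int)) : Prop := out = draw_christmas_tree_alt blocks border_color fill_color empty_color block_height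
instance (blocks : Int) (border_color : Int) (fill_color : Int) (empty_color : Int) (block_height : Int) (out : List (List Int)) : Decidable (Spec_draw_christmas_tree blocks border_color fill_color empty_color block_height out) := by unfold Spec_draw_christmas_tree; infer_instance

-- ===== CLAIM (what is proved, stated in full; the proofs are below) =====
def Claim_equal_draw_christmas_tree : Prop := ∀ (blocks : Int) (border_color : Int) (fill_color : Int) (empty_color : Int) (block_height : Int), Dom_draw_christmas_tree blocks border_color fill_color empty_color block_height → Spec_draw_christmas_tree blocks border_color fill_color empty_color block_height (draw_christmas_tree blocks border_color fill_color empty_color block_height)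

-- ===== LEMMAS AND PROOFS =====

/-- A's per-cell decision, as a function of the column index. -/
def cellA (bc fc ec W bn i j : Int) : Int :=
  if j < i + bn ∨ W - i - bn ≤ j then ec
  else if j < i + bn + 1 ∨ W - i - bn - 1 ≤ j ∨ (bn = 0 ∧ i = 0) then bc else fc

/-- B's row, as a function of the block/row indices. -/
def rowB (bc fc ec W bn i : Int) : List Int :=
  let k : Int := bn + i
  let w : Int := W - 2 * k
  if w ≤ 0 then List.replicate W.toNat ec
  else if bn = 0 ∧ i = 0 then List.replicate W.toNat bc
  else if w ≤ 2 then
    List.replicate k.toNat ec ++ List.replicate w.toNat bc ++ List.replicate k.toNat ec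
  else
    List.replicate k.toNat ec ++ [bc] ++ List.replicate (w - 2).toNat fc ++ [bc] ++ List.replicate k.toNat ec

lemma A_unfold (blocks bc fc ec bh : Int) :
    draw_christmas_tree blocks bc fc ec bh
      = ((PySem.List.pyRange 0 blocks 1).flatMap (fun bn =>
          (PySem.List.pyRange 0 bh 1).map (fun i =>
            (PySem.List.pyRange 0 (3 + 2 * blocks) 1).map (cellA bc fc ec (3 + 2 * blocks) bn i)))).reverse := by
  simp only [draw_christmas_tree]
  congr 1
  rw [PySem.List.foldl_congr_mem (g := fun acc bn => acc ++
      (PySem.List.pyRange 0 bh 1).map (fun i =>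
        (PySem.List.pyRange 0 (3 + 2 * blocks) 1).map (cellA bc fc ec (3 + 2 * blocks) bn i)))]
  · rw [PySem.List.foldl_append_eq_flatMap]; simp
  · intro acc bn _
    rw [PySem.List.foldl_congr_mem (g := fun acc i => acc ++
        [(PySem.List.pyRange 0 (3 + 2 * blocks) 1).map (cellA bc fc ec (3 + 2 * blocks) bn i)])]
    · rw [PySem.List.foldl_append_singleton_eq_map]
    · intro acc2 i _
      congr 1
      rw [PySem.List.foldl_congr_mem (g := fun row j => row ++ [cellA bc fc ec (3 + 2 * blocks) bn i j])]
      · rw [PySem.List.foldl_append_singleton_eq_map]; simp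
      · intro row j _
        simp only [cellA]
        split_ifs <;> rfl

lemma B_unfold (blocks bc fc ec bh : Int) :
    draw_christmas_tree_alt blocks bc fc ec bh
      = ((PySem.List.pyRange 0 blocks 1).reverse).flatMap (fun bn =>
          ((PySem.List.pyRange 0 bh 1).reverse).map (rowB bc fc ec (3 + 2 * blocks) bn)) := by
  simp only [draw_christmas_tree_alt]
  rw [PySem.List.foldl_congr_mem (g := fun acc bn => acc ++
      ((PySem.List.pyRange 0 bh 1).reverse).map (rowB bc fc ec (3 + 2 * blocks) bn))]
  · rw [PySem.List.foldl_append_eq_flatMap]; simp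
  · intro acc bn _
    rw [PySem.List.foldl_append_singleton_eq_map]
    simp [rowB]

lemma row_eq (bc fc ec blocks bn i : Int) (hbn : 0 ≤ bn) (hblocks : bn < blocks) (hi : 0 ≤ i) :
    (PySem.List.pyRange 0 (3 + 2 * blocks) 1).map (cellA bc fc ec (3 + 2 * blocks) bn i)
      = rowB bc fc ec (3 + 2 * blocks) bn i := by
  rw [PySem.List.pyRange_one, List.map_map]
  simp only [rowB]
  split_ifs with h1 h2 h3
  · -- row entirely outside the tree: all empty
    apply List.ext_getElem
    · simp
    · intro n h₁ h₂
      simp only [List.length_map, List.length_range] at h₁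
      simp only [List.getElem_map, List.getElem_range, Function.comp_apply, cellA,
        List.getElem_replicate]
      rw [if_pos (by omega)]
  · -- top row of the tree: all border
    obtain ⟨rfl, rfl⟩ := h2
    apply List.ext_getElem
    · simp
    · intro n h₁ h₂
      simp only [List.length_map, List.length_range] at h₁
      simp only [List.getElem_map, List.getElem_range, Function.comp_apply, cellA,
        List.getElem_replicate]
      rw [if_neg (by omega), if_pos (by simp)]
  · -- narrow interior (width 1 or 2): border only
    apply List.ext_getElem
    · simp; omega
    · intro n h₁ h₂
      simp only [List.length_map, List.length_range] at h₁
      simp only [List.length_append, List.length_replicate] at h₂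
      simp only [List.getElem_map, List.getElem_range, Function.comp_apply, cellA,
        List.getElem_append, List.getElem_replicate, List.length_replicate, List.length_append]
      split_ifs <;> first | rfl | (exfalso; omega)
  · -- general row: empty, border, fill, border, empty
    apply List.ext_getElem
    · simp; omega
    · intro n h₁ h₂
      simp only [List.length_map, List.length_range] at h₁
      simp only [List.length_append, List.length_replicate, List.length_singleton] at h₂
      simp only [List.getElem_map, List.getElem_range, Function.comp_apply, cellA,
        List.getElem_append, List.getElem_replicate, List.getElem_singleton,
        List.length_replicate, List.length_singleton, List.length_append]
      split_ifs <;> first | rfl | (exfalso; omega)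

-- ===== VERDICT (by name: the statement is the Claim_ definition above) =====
theorem draw_christmas_tree_spec : Claim_equal_draw_christmas_tree := by
  intro blocks bc fc ec bh _
  unfold Spec_draw_christmas_tree
  rw [A_unfold, B_unfold, List.reverse_flatMap]
  apply List.flatMap_congr
  intro bn hbn
  simp only [Function.comp_apply, List.map_reverse]
  congr 1
  apply List.map_congr_left
  intro i hi
  have h1 := PySem.List.mem_pyRange_one.mp (List.mem_reverse.mp hbn)
  have h2 := PySem.List.mem_pyRange_one.mp hi
  exact row_eq bc fc ec blocks bn i h1.1 h1.2 h2.1
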